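-- pv_equiv track=rewrite | github.com/svishal-aero/pymake | getCtypesName.py | getCtypesName
-- ===== SOURCE A (Python) =====
-- nameDict = {
--     'char'  : 'C.c_char',
--     'int'   : 'C.c_int',
--     'float' : 'C.c_float',
--     'double': 'C.c_double',
--     'long'  : 'C.c_long',
--     'ulong' : 'C.c_ulong',
-- }
--
-- def getCtypesName(vartype, varsize):
--
--     if len(varsize)>0:
--
--         if varsize[-1]==0 and vartype=='void':
--             varsize = varsize[:-1]
--             vartype = 'C.c_void_p'
--
--         elif varsize[-1]==0 and vartype=='char':
--             varsize = varsize[:-1]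
--             vartype = 'C.c_char_p'
--
--         elif vartype in nameDict.keys():
--             vartype = nameDict[vartype]
--
--     elif vartype in nameDict.keys():
--         vartype = nameDict[vartype]
--
--     while len(varsize)>0:
--
--         if varsize[-1]==0:
--             vartype = 'C.POINTER('+vartype+')'
--
--         else:
--             vartype = '('+vartype+')*'+str(varsize[-1])
--
--         varsize = varsize[:-1]
--
--     return vartype
-- ===== SOURCE B (Python) =====
-- nameDict = {
--     'char'  : 'C.c_char',
--     'int'   : 'C.c_int',
--     'float' : 'C.c_float',
--     'double': 'C.c_double',
--     'long'  : 'C.c_long',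
--     'ulong' : 'C.c_ulong',
-- }
--
-- pointerDict = {'void': 'C.c_void_p', 'char': 'C.c_char_p'}
--
-- def _wrap(dims, base):
--     # one forward pass collecting outside-in pieces, joined once at the end
--     pre = []
--     suf = []
--     for n in dims:
--         if n == 0:
--             pre.append('C.POINTER(')
--             suf.append(')')
--         else:
--             pre.append('(')
--             suf.append(')*' + str(n))
--     suf.reverse()
--     return ''.join(pre) + base + ''.join(suf)
--
-- def getCtypesName(vartype, varsize):
--     if varsize and varsize[-1] == 0 and vartype in pointerDict:
--         return _wrap(varsize[:-1], pointerDict[vartype])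
--     return _wrap(varsize, nameDict.get(vartype, vartype))
-- ===== Notes on version B (the rewrite author's own statement) =====
-- stated objective: faster
-- what changed: Replaces A's tail-inward while loop that slices varsize and rebuilds the whole nested string each iteration, plus its 4-way base-type branch, with a helper doing one forward pass collecting prefix/suffix piece lists joined once at the end, dispatched via a small pointer-special-case dict and a single dict.get.
import Mathlib
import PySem

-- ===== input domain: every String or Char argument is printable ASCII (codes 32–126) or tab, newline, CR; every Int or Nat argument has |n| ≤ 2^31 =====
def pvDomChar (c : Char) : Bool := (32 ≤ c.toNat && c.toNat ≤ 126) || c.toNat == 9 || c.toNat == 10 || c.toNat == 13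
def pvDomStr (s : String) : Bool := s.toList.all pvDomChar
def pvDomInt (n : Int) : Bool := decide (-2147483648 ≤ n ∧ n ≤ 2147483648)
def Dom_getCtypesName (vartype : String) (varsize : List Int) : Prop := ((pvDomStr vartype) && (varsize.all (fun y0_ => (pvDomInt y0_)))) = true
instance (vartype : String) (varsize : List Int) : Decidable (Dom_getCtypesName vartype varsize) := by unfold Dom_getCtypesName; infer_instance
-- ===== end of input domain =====

-- B replaces A's tail-inward while loop (repeated slicing + string rebuilding) and its
-- 4-way base-type branch with a head-first recursive wrapper and a pointer-case dict.

-- module-level nameDict (shared verbatim by both Pythons)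
def nameDict : PySem.Dict String String := PySem.Dict.ofList
  [("char", "C.c_char"), ("int", "C.c_int"), ("float", "C.c_float"),
   ("double", "C.c_double"), ("long", "C.c_long"), ("ulong", "C.c_ulong")]

-- ===== PORT A =====
-- A's while loop: wraps vartype using the LAST element, then drops it
def aLoop (vartype : String) (varsize : List Int) : String :=
  if h : varsize = [] then vartype
  else
    let last := varsize.getLast h
    let vartype' :=
      if last = 0 then "C.POINTER(" ++ vartype ++ ")"
      else "(" ++ vartype ++ ")*" ++ PySem.Int.toStr last
    aLoop vartype' varsize.dropLast
termination_by varsize.length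
decreasing_by simp [List.length_dropLast]; exact List.length_pos_iff.mpr h

def getCtypesName (vartype : String) (varsize : List Int) : String :=
  let (vt, vs) :=
    if h : varsize = [] then
      (PySem.Dict.getD nameDict vartype vartype, varsize)
    else
      let last := varsize.getLast h
      if last = 0 ∧ vartype = "void" then ("C.c_void_p", varsize.dropLast)
      else if last = 0 ∧ vartype = "char" then ("C.c_char_p", varsize.dropLast)
      else (PySem.Dict.getD nameDict vartype vartype, varsize)
  aLoop vt vs

-- ===== PORT B =====
-- pointerDict from Source B
def pointerDict : PySem.Dict String String := PySem.Dict.ofList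
  [("void", "C.c_void_p"), ("char", "C.c_char_p")]

-- Source B's _wrap: one forward pass collecting piece lists, joined once
def bStep (ps : List String × List String) (n : Int) : List String × List String :=
  if n = 0 then (ps.1 ++ ["C.POINTER("], ps.2 ++ [")"])
  else (ps.1 ++ ["("], ps.2 ++ [")*" ++ PySem.Int.toStr n])

def bWrap (dims : List Int) (base : String) : String :=
  let (pre, suf) := dims.foldl bStep ([], [])
  PySem.Str.join "" pre ++ base ++ PySem.Str.join "" suf.reverse

def getCtypesName_alt (vartype : String) (varsize : List Int) : String :=
  if varsize.getLast? = some 0 ∧ PySem.Dict.contains pointerDict vartype then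
    bWrap varsize.dropLast (PySem.Dict.getD pointerDict vartype "")
  else
    bWrap varsize (PySem.Dict.getD nameDict vartype vartype)

-- ===== PRECONDITION & SPEC =====
def Spec_getCtypesName (vartype : String) (varsize : List Int) (out : String) : Prop := out = getCtypesName_alt vartype varsize
instance (vartype : String) (varsize : List Int) (out : String) : Decidable (Spec_getCtypesName vartype varsize out) := by unfold Spec_getCtypesName; infer_instance

-- ===== CLAIM =====
def Claim_equal_getCtypesName : Prop := ∀ (vartype : String) (varsize : List Int), Dom_getCtypesName vartype varsize → Spec_getCtypesName vartype varsize (getCtypesName vartype varsize)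

-- ===== LEMMAS AND PROOFS =====

lemma aLoop_nil (vt : String) : aLoop vt [] = vt := by
  rw [aLoop.eq_def]; simp

lemma aLoop_concat (vt : String) (vs : List Int) (n : Int) :
    aLoop vt (vs ++ [n]) =
      aLoop (if n = 0 then "C.POINTER(" ++ vt ++ ")"
             else "(" ++ vt ++ ")*" ++ PySem.Int.toStr n) vs := by
  rw [aLoop.eq_def]
  simp

-- ''.join with empty separator is concatenation of the pieces
lemma join_empty (l : List (List Char)) : PySem.Chars.join [] l = l.flatten := by
  induction l with
  | nil => simp [PySem.Chars.join_nil]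
  | cons a l ih =>
    cases l with
    | nil => simp [PySem.Chars.join_singleton]
    | cons b r => rw [PySem.Chars.join_cons_cons]; simp_all

lemma bWrap_concat (ys : List Int) (n : Int) (vt : String) :
    bWrap (ys ++ [n]) vt =
      bWrap ys (if n = 0 then "C.POINTER(" ++ vt ++ ")"
                else "(" ++ vt ++ ")*" ++ PySem.Int.toStr n) := by
  simp only [bWrap, List.foldl_append, List.foldl_cons, List.foldl_nil, bStep]
  split_ifs <;>
    · simp [PySem.Str.join, join_empty, String.append_assoc]
      first
      | (rw [show ∀ xs : List Char, (')' :: '*' :: xs) = [')', '*'] ++ xs from fun _ => rfl,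
            String.ofList_append, String.ofList_append]; rfl)
      | rw [show ∀ xs : List Char, (')' :: xs) = [')'] ++ xs from fun _ => rfl,
            String.ofList_append]

lemma aLoop_eq_bWrap (vs : List Int) : ∀ vt : String, aLoop vt vs = bWrap vs vt := by
  induction vs using List.reverseRecOn with
  | nil => intro vt; simp [aLoop_nil, bWrap, PySem.Str.join]
  | append_singleton ys n ih =>
    intro vt
    rw [aLoop_concat, bWrap_concat, ih]

-- ===== VERDICT =====
theorem getCtypesName_spec : Claim_equal_getCtypesName := by
  intro vartype varsize _
  unfold Spec_getCtypesName getCtypesName getCtypesName_alt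
  by_cases h : varsize = []
  · subst h
    simp [aLoop_eq_bWrap, pointerDict, PySem.Dict.contains]
  · have hlast : varsize.getLast? = some (varsize.getLast h) :=
      List.getLast?_eq_some_getLast h
    by_cases hv : vartype = "void"
    · subst hv
      by_cases hz : varsize.getLast h = 0 <;>
        simp [h, hz, hlast, aLoop_eq_bWrap, pointerDict, nameDict,
          PySem.Dict.contains, PySem.Dict.getD, PySem.Dict.get?, PySem.Dict.ofList,
          PySem.Dict.update, PySem.Dict.empty, PySem.Dict.insert]
    · by_cases hc : vartype = "char"
      · subst hc
        by_cases hz : varsize.getLast h = 0 <;>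
          simp [h, hz, hlast, aLoop_eq_bWrap, pointerDict, nameDict,
            PySem.Dict.contains, PySem.Dict.getD, PySem.Dict.get?, PySem.Dict.ofList,
          PySem.Dict.update, PySem.Dict.empty, PySem.Dict.insert]
      · have hmem : ¬("void" = vartype ∨ "char" = vartype) := by
          rintro (h' | h')
          · exact hv h'.symm
          · exact hc h'.symm
        simp [h, hlast, aLoop_eq_bWrap, pointerDict, nameDict, hv, hc, hmem,
          PySem.Dict.contains, PySem.Dict.getD, PySem.Dict.get?, PySem.Dict.ofList,
          PySem.Dict.update, PySem.Dict.empty, PySem.Dict.insert]
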